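-- pv_equiv track=rewrite | github.com/shiyi-oo/hypergraph-lower-ricci-curvature | code/src/util.py | edges_neighborhood
-- ===== SOURCE A (Python) =====
-- from collections import Counter, defaultdict
--
-- def edges_neighborhood(H: list[list[int]],
--                        v_neigh: dict[int, set[int]]
--                       ) -> dict[int, set[int]]:
--     """
--     For each hyperedge (by its index in H), the intersection of its member-nodes' neighborhoods.
--     """
--     e_neigh: dict[int, set[int]] = defaultdict(set)
--     for idx, edge in enumerate(H):
--         if len(edge) <= 1:
--             e_neigh[idx] = set()
--         else:
--             # intersection of neighbors[v] for v in edge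
--             e_neigh[idx] = set.intersection(*(v_neigh[v] for v in edge))
--     return e_neigh
-- ===== SOURCE B (Python) =====
-- from collections import Counter, defaultdict
--
-- def _common_neighbors(edge, v_neigh):
--     """Nodes in every member's neighborhood, by occurrence counting."""
--     if len(edge) <= 1:
--         return set()
--     cnt = Counter(x for v in edge for x in v_neigh[v])
--     k = len(edge)
--     return {x for x in cnt if cnt[x] == k}
--
-- def edges_neighborhood(H: list[list[int]],
--                        v_neigh: dict[int, set[int]]
--                       ) -> dict[int, set[int]]:
--     return defaultdict(set, {idx: _common_neighbors(edge, v_neigh)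
--                              for idx, edge in enumerate(H)})
-- ===== Notes on version B (the rewrite author's own statement) =====
-- stated objective: alternative
-- what changed: B builds the whole result as a dict comprehension over enumerate(H) (no mutable dict/index loop) and replaces each set.intersection(*...) call by a Counter over the members' concatenated neighborhoods, keeping the nodes counted len(edge) times.
import Mathlib
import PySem

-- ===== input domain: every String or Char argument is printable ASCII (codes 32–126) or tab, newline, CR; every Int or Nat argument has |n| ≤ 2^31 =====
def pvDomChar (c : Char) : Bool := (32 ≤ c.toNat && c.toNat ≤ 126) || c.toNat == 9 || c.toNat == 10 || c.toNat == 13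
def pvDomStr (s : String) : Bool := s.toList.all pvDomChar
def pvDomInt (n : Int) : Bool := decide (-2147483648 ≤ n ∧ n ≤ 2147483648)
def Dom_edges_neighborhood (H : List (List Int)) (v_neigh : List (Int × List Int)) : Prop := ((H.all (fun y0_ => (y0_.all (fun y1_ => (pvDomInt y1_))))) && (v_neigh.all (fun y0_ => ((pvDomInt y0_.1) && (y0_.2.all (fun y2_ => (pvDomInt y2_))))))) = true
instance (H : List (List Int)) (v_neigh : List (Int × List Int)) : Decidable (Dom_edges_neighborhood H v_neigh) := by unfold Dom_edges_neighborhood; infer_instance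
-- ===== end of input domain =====

-- B rebuilds the whole result as a dict comprehension over enumerate(H) and replaces each
-- set.intersection(*…) by a Counter over the members' neighborhoods, keeping the nodes
-- counted len(edge) times (objective: alternative decomposition, no index/dict-building loop).

-- ===== PORT A =====
-- v_neigh[v]; total via getD [] — Pre_ excludes the missing-key (KeyError) inputs
def pvLookA (v_neigh : List (Int × List Int)) (v : Int) : List Int :=
  ((PySem.Dict.mk v_neigh).get? v).getD []

def pvStepA (v_neigh : List (Int × List Int)) (st : Int × PySem.Dict Int (List Int))
    (edge : List Int) : Int × PySem.Dict Int (List Int) :=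
  if edge.length ≤ 1 then (st.1 + 1, st.2.insert st.1 PySem.Set.empty)
  else
    -- set.intersection(*(v_neigh[v] for v in edge)): fold ∩ from the first member's set
    let s : PySem.Set Int :=
      match edge.map (pvLookA v_neigh) with
      | [] => []                                   -- unreachable: edge has ≥ 2 members here
      | s0 :: rest => rest.foldl PySem.Set.inter s0
    (st.1 + 1, st.2.insert st.1 s)

def edges_neighborhood (H : List (List Int)) (v_neigh : List (Int × List Int)) : List (Int × List Int) :=
  ((H.foldl (pvStepA v_neigh) (0, PySem.Dict.empty)).2).items

-- ===== PORT B =====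
-- _common_neighbors: Counter over the concatenated neighborhoods, keep count == len(edge)
def pvCommonB (v_neigh : List (Int × List Int)) (edge : List Int) : List Int :=
  if edge.length ≤ 1 then PySem.Set.empty
  else
    let cnt : PySem.Dict Int Int :=
      PySem.Dict.counter ((edge.map (fun v => (PySem.Dict.mk v_neigh).getD v [])).flatten)
    cnt.keys.filter (fun x => cnt.getD x 0 == (edge.length : Int))

-- defaultdict(set, {idx: _common_neighbors(edge, v_neigh) for idx, edge in enumerate(H)})
def edges_neighborhood_alt (H : List (List Int)) (v_neigh : List (Int × List Int)) : List (Int × List Int) :=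
  ((PySem.List.enumerate H 0).foldl
      (fun d p => d.insert p.1 (pvCommonB v_neigh p.2)) PySem.Dict.empty).items

-- ===== PRECONDITION & SPEC =====
-- First conjunct: exactly the inputs where Python raises KeyError (a vertex of an edge of size ≥ 2
-- missing from v_neigh). Second conjunct narrows beyond that: v_neigh's values are typed
-- dict[int, set[int]], so each value list must hold distinct elements to encode a Python set.
def Pre_edges_neighborhood (H : List (List Int)) (v_neigh : List (Int × List Int)) : Prop :=
  (∀ edge ∈ H, 2 ≤ edge.length → ∀ v ∈ edge, v ∈ v_neigh.map Prod.fst) ∧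
  (∀ p ∈ v_neigh, (p.2 : List Int).Nodup)
instance (H : List (List Int)) (v_neigh : List (Int × List Int)) : Decidable (Pre_edges_neighborhood H v_neigh) := by unfold Pre_edges_neighborhood; infer_instance

def pvWitness_edges_neighborhood : List (List Int) × (List (Int × List Int)) :=
  ([[1, 2], [3], []], [(1, [5, 6]), (2, [6, 5]), (3, [])])

def Spec_edges_neighborhood (H : List (List Int)) (v_neigh : List (Int × List Int)) (out : List (Int × List Int)) : Prop := out = edges_neighborhood_alt H v_neigh
instance (H : List (List Int)) (v_neigh : List (Int × List Int)) (out : List (Int × List Int)) : Decidable (Spec_edges_neighborhood H v_neigh out) := by unfold Spec_edges_neighborhood; infer_instance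

-- ===== CLAIM (what is proved, stated in full; the proofs are below) =====
def Claim_equal_edges_neighborhood : Prop := ∀ (H : List (List Int)) (v_neigh : List (Int × List Int)), Dom_edges_neighborhood H v_neigh → Pre_edges_neighborhood H v_neigh → Spec_edges_neighborhood H v_neigh (edges_neighborhood H v_neigh)

-- ===== LEMMAS AND PROOFS =====

-- the output list both programs produce: pairs (k, per-edge common neighborhood)
def pvOut (v_neigh : List (Int × List Int)) : Int → List (List Int) → List (Int × List Int)
  | _, [] => []
  | k, e :: t => (k, pvCommonB v_neigh e) :: pvOut v_neigh (k + 1) t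

-- every looked-up neighborhood list is duplicate-free under Pre_'s second conjunct
theorem pvLookA_nodup (v_neigh : List (Int × List Int))
    (hnd : ∀ p ∈ v_neigh, (p.2 : List Int).Nodup) (v : Int) : (pvLookA v_neigh v).Nodup := by
  unfold pvLookA
  cases h : (PySem.Dict.mk v_neigh).get? v with
  | none => simp
  | some w =>
    have hm := PySem.Dict.mem_items_of_get?_eq_some _ h
    simpa using hnd (v, w) (by simpa [PySem.Dict.items] using hm)

-- A's intersection fold is a filter of the first set
theorem foldl_inter_eq_filter (ts : List (List Int)) (s0 : List Int) :
    ts.foldl PySem.Set.inter s0 = s0.filter (fun x => ts.all (fun t => t.contains x)) := by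
  induction ts generalizing s0 with
  | nil => simp
  | cons t ts ih =>
    simp only [List.foldl_cons, ih, PySem.Set.inter, List.filter_filter, List.all_cons]
    exact List.filter_congr (fun x _ => by simp [PySem.Set.contains, Bool.and_comm])

-- a sum of 0/1 counts over duplicate-free lists reaches the length iff every list contains x
theorem sum_counts_le (ts : List (List Int)) (x : Int) (hnd : ∀ t ∈ ts, t.Nodup) :
    (ts.map (List.count x)).sum ≤ ts.length := by
  induction ts with
  | nil => simp
  | cons t ts ih =>
    simp only [List.map_cons, List.sum_cons, List.length_cons]
    have ht : List.count x t ≤ 1 := by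
      by_cases hx : x ∈ t
      · exact le_of_eq (List.count_eq_one_of_mem (hnd t (by simp)) hx)
      · simp [List.count_eq_zero_of_not_mem hx]
    have := ih (fun t ht => hnd t (by simp [ht]))
    omega

theorem sum_counts_eq_iff (ts : List (List Int)) (x : Int) (hnd : ∀ t ∈ ts, t.Nodup) :
    (ts.map (List.count x)).sum = ts.length ↔ ∀ t ∈ ts, x ∈ t := by
  induction ts with
  | nil => simp
  | cons t ts ih =>
    have htail : ∀ t ∈ ts, List.Nodup t := fun t ht => hnd t (by simp [ht])
    have hsum := sum_counts_le ts x htail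
    have ihm := ih htail
    simp only [List.map_cons, List.sum_cons, List.length_cons, List.mem_cons]
    constructor
    · intro h
      have ht1 : List.count x t ≤ 1 := by
        by_cases hx : x ∈ t
        · exact le_of_eq (List.count_eq_one_of_mem (hnd t (by simp)) hx)
        · simp [List.count_eq_zero_of_not_mem hx]
      have hc1 : List.count x t = 1 := by omega
      have hx : x ∈ t := by
        by_contra hx
        simp [List.count_eq_zero_of_not_mem hx] at hc1
      have hrest : (ts.map (List.count x)).sum = ts.length := by omega
      intro u hu
      rcases hu with h | h
      · exact h ▸ hx
      · exact (ihm.mp hrest) u h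
    · intro h
      have hc1 : List.count x t = 1 :=
        List.count_eq_one_of_mem (hnd t (by simp)) (h t (Or.inl rfl))
      have : (ts.map (List.count x)).sum = ts.length :=
        ihm.mpr (fun u hu => h u (Or.inr hu))
      omega

-- folding Set.add appends exactly the not-yet-present elements
theorem foldl_add_append (R : List Int) : ∀ s : List Int,
    ∃ extra, R.foldl PySem.Set.add s = s ++ extra ∧ ∀ x ∈ extra, x ∉ s := by
  induction R with
  | nil => exact fun s => ⟨[], by simp⟩
  | cons x R ih =>
    intro s
    by_cases hx : x ∈ s
    · have hkeep : PySem.Set.add s x = s := by simp [PySem.Set.add, PySem.Set.contains, hx]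
      simpa [List.foldl_cons, hkeep] using ih s
    · have hadd : PySem.Set.add s x = s ++ [x] := by simp [PySem.Set.add, PySem.Set.contains, hx]
      obtain ⟨extra, he, hex⟩ := ih (s ++ [x])
      refine ⟨x :: extra, ?_, ?_⟩
      · rw [List.foldl_cons, hadd, he]
        simp
      · intro y hy hymem
        rcases List.mem_cons.mp hy with h | h
        · exact hx (h ▸ hymem)
        · exact hex y h (by simp [hymem])

theorem foldl_add_nodup_self (l : List Int) : ∀ s : List Int, (s ++ l).Nodup →
    l.foldl PySem.Set.add s = s ++ l := by
  induction l with
  | nil => simp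
  | cons x l ih =>
    intro s hnd
    have hx : x ∉ s := by
      intro hmem
      exact (List.disjoint_of_nodup_append hnd) hmem (by simp)
    have hadd : PySem.Set.add s x = s ++ [x] := by
      simp [PySem.Set.add, PySem.Set.contains, hx]
    simp only [List.foldl_cons, hadd]
    rw [ih (s ++ [x]) (by rw [← List.append_cons]; exact hnd)]
    simp

-- the crux: counting keeps exactly the first set's elements present in every other set
theorem count_filter_eq_inter (s0 : List Int) (ts : List (List Int))
    (h0 : s0.Nodup) (hts : ∀ t ∈ ts, t.Nodup) :
    ((PySem.Set.ofList (s0 ++ ts.flatten)).filter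
        (fun x => ((List.count x (s0 ++ ts.flatten) : Int) == ((ts.length : Int) + 1))))
      = s0.filter (fun x => ts.all (fun t => t.contains x)) := by
  obtain ⟨extra, he, hex⟩ := foldl_add_append ts.flatten s0
  have hof : PySem.Set.ofList (s0 ++ ts.flatten) = s0 ++ extra := by
    unfold PySem.Set.ofList
    rw [List.foldl_append, foldl_add_nodup_self s0 PySem.Set.empty
      (by simpa [PySem.Set.empty] using h0)]
    simpa [PySem.Set.empty] using he
  have hmemp : ∀ x, ((List.count x (s0 ++ ts.flatten) : Int) == ((ts.length : Int) + 1)) = true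
      ↔ (x ∈ s0 ∧ ∀ t ∈ ts, x ∈ t) := by
    intro x
    rw [beq_iff_eq]
    have hcs : List.count x (s0 ++ ts.flatten) = List.count x s0 + (ts.map (List.count x)).sum := by
      rw [List.count_append, List.count_flatten]
    have h1 : List.count x s0 ≤ 1 := by
      by_cases hx : x ∈ s0
      · exact le_of_eq (List.count_eq_one_of_mem h0 hx)
      · simp [List.count_eq_zero_of_not_mem hx]
    have h2 := sum_counts_le ts x hts
    constructor
    · intro h
      have hnat : List.count x (s0 ++ ts.flatten) = ts.length + 1 := by exact_mod_cast h
      have hc1 : List.count x s0 = 1 := by omega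
      have hx : x ∈ s0 := by
        by_contra hx
        simp [List.count_eq_zero_of_not_mem hx] at hc1
      exact ⟨hx, (sum_counts_eq_iff ts x hts).mp (by omega)⟩
    · rintro ⟨hx, hall⟩
      have hc1 : List.count x s0 = 1 := List.count_eq_one_of_mem h0 hx
      have hsum : (ts.map (List.count x)).sum = ts.length := (sum_counts_eq_iff ts x hts).mpr hall
      have : List.count x (s0 ++ ts.flatten) = ts.length + 1 := by omega
      exact_mod_cast congrArg (Nat.cast : Nat → Int) this
  rw [hof, List.filter_append]
  have hextra : extra.filter
      (fun x => ((List.count x (s0 ++ ts.flatten) : Int) == ((ts.length : Int) + 1))) = [] := by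
    rw [List.filter_eq_nil_iff]
    intro a ha hp
    exact hex a ha ((hmemp a).mp hp).1
  rw [hextra, List.append_nil]
  refine List.filter_congr (fun x hx => ?_)
  rw [Bool.eq_iff_iff, hmemp x]
  simp [List.all_eq_true, hx]

-- B's lookup computes A's (getD = get? + default)
theorem lookB_eq_lookA (v_neigh : List (Int × List Int)) :
    (fun v => (PySem.Dict.mk v_neigh).getD v []) = pvLookA v_neigh := by
  funext v
  rw [PySem.Dict.getD_eq_get?_getD]
  rfl

-- the per-edge value A inserts equals B's _common_neighbors
theorem valA_eq_commonB (v_neigh : List (Int × List Int))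
    (hnd : ∀ p ∈ v_neigh, (p.2 : List Int).Nodup) (edge : List Int) (h2 : ¬ edge.length ≤ 1) :
    (match edge.map (pvLookA v_neigh) with
      | [] => ([] : List Int)
      | s0 :: rest => rest.foldl PySem.Set.inter s0)
      = pvCommonB v_neigh edge := by
  cases edge with
  | nil => simp at h2
  | cons v0 vs =>
    have hndl : ∀ t ∈ vs.map (pvLookA v_neigh), t.Nodup := by
      intro t ht
      obtain ⟨v, -, rfl⟩ := List.mem_map.mp ht
      exact pvLookA_nodup v_neigh hnd v
    have hkey := count_filter_eq_inter (pvLookA v_neigh v0) (vs.map (pvLookA v_neigh))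
      (pvLookA_nodup v_neigh hnd v0) hndl
    simp only [pvCommonB, if_neg h2, lookB_eq_lookA, List.map_cons, List.flatten_cons,
      PySem.Dict.keys_counter, PySem.Dict.getD_counter]
    have hl : (((v0 :: vs).length : Nat) : Int) = ((vs.map (pvLookA v_neigh)).length : Int) + 1 := by
      simp
    rw [foldl_inter_eq_filter, ← hkey, hl]

-- A's indexed dict-building fold appends exactly pvOut
theorem foldA_items (v_neigh : List (Int × List Int))
    (hnd : ∀ p ∈ v_neigh, (p.2 : List Int).Nodup) (H : List (List Int)) :
    ∀ (k : Int) (d : PySem.Dict Int (List Int)), (∀ p ∈ d.items, p.1 < k) →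
      ((H.foldl (pvStepA v_neigh) (k, d)).2).items = d.items ++ pvOut v_neigh k H := by
  induction H with
  | nil => intro k d _; simp [pvOut]
  | cons e t ih =>
    intro k d hk
    have hfresh : d.contains k = false := by
      rw [PySem.Dict.contains_eq_decide_mem_keys, decide_eq_false_iff_not]
      intro hmem
      simp only [PySem.Dict.keys, List.mem_map] at hmem
      obtain ⟨p, hp, hp1⟩ := hmem
      exact absurd (hp1 ▸ hk p hp) (lt_irrefl k)
    have hstep : pvStepA v_neigh (k, d) e = (k + 1, d.insert k (pvCommonB v_neigh e)) := by
      by_cases h1 : e.length ≤ 1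
      · have : pvCommonB v_neigh e = PySem.Set.empty := by simp [pvCommonB, if_pos h1]
        simp [pvStepA, if_pos h1, this]
      · simp only [pvStepA, if_neg h1]
        rw [valA_eq_commonB v_neigh hnd e h1]
    have hins := PySem.Dict.items_insert_of_not_contains (d := d)
      (k := k) (v := pvCommonB v_neigh e) hfresh
    have hk' : ∀ p ∈ (d.insert k (pvCommonB v_neigh e)).items, p.1 < k + 1 := by
      intro p hp
      rw [hins] at hp
      rcases List.mem_append.mp hp with h | h
      · exact lt_trans (hk p h) (by omega)
      · have hpe : p = (k, pvCommonB v_neigh e) := by simpa using h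
        rw [hpe]; omega
    rw [List.foldl_cons, hstep, ih (k + 1) _ hk', hins, pvOut]
    simp

-- B's enumerate comprehension also produces pvOut
theorem enumB_eq_pvOut (v_neigh : List (Int × List Int)) (H : List (List Int)) :
    ∀ n : Int, (PySem.List.enumerate H n).map
        (fun p => (p.1, pvCommonB v_neigh p.2)) = pvOut v_neigh n H := by
  induction H with
  | nil => intro n; simp [pvOut]
  | cons e t ih =>
    intro n
    rw [PySem.List.enumerate_cons, List.map_cons, ih (n + 1), pvOut]

-- the indices enumerate produces are strictly increasing, hence distinct
theorem enumB_fst_nodup (H : List (List Int)) (n : Int) :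
    ((PySem.List.enumerate H n).map Prod.fst).Nodup := by
  have hpw := PySem.List.pairwise_lt_enumerate H n
  exact List.Pairwise.imp ne_of_lt (List.Pairwise.map Prod.fst (fun _ _ h => h) hpw)

-- ===== VERDICT (by name: the statement is the Claim_ definition above) =====
theorem edges_neighborhood_spec : Claim_equal_edges_neighborhood := by
  intro H v_neigh _ hPre
  unfold Spec_edges_neighborhood edges_neighborhood edges_neighborhood_alt
  rw [foldA_items v_neigh hPre.2 H 0 PySem.Dict.empty
    (by intro p hp; simp [PySem.Dict.empty] at hp)]
  rw [PySem.Dict.items_foldl_insert_fresh (PySem.List.enumerate H 0)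
    (fun p => p.1) (fun p => pvCommonB v_neigh p.2) PySem.Dict.empty
    (by intro a ha; simp [PySem.Dict.contains_empty]) (enumB_fst_nodup H 0)]
  simp [enumB_eq_pvOut v_neigh H 0, PySem.Dict.empty]
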